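-- pv_equiv track=rewrite | github.com/uchenna-j-edeh/dailly_problems | arrays_manipulations_algorithms/find_starting_indices_anagram.py | solution
-- ===== SOURCE A (Python) =====
-- def solution(S, W):
--     indices = []
--     len_w = len(W)
--     rw = ''.join(reversed(W))
--     for i, _ in enumerate(S):
--         j = i + len(W)
--         pattern = S[i:j]
--
--         if pattern == W:
--             indices.append(i)
--
--         elif pattern == rw:
--             indices.append(i)
--
--     return indices
-- ===== SOURCE B (Python) =====
-- def solution(S, W):
--     n = len(S)
--     if not W:
--         return list(range(n))
--     rw = W[::-1]
--     return _merge(_occurrences(S, W), _occurrences(S, rw))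
--
-- def _occurrences(S, p):
--     # all start indices of p in S via the C-level substring search, in order
--     res = []
--     k = S.find(p)
--     while k != -1:
--         res.append(k)
--         k = S.find(p, k + 1)
--     return res
--
-- def _merge(a, b):
--     # union-merge of two strictly increasing lists
--     out = []
--     i = j = 0
--     while i < len(a) and j < len(b):
--         if a[i] < b[j]:
--             out.append(a[i]); i += 1
--         elif b[j] < a[i]:
--             out.append(b[j]); j += 1
--         else:
--             out.append(a[i]); i += 1; j += 1
--     out.extend(a[i:])
--     out.extend(b[j:])
--     return out
-- ===== Notes on version B (the rewrite author's own statement) =====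
-- stated objective: faster
-- what changed: replaces A's per-index slice-and-compare scan with repeated str.find substring searches collecting the occurrence lists of W and of reversed W, followed by a sorted union-merge of the two lists
import Mathlib
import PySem

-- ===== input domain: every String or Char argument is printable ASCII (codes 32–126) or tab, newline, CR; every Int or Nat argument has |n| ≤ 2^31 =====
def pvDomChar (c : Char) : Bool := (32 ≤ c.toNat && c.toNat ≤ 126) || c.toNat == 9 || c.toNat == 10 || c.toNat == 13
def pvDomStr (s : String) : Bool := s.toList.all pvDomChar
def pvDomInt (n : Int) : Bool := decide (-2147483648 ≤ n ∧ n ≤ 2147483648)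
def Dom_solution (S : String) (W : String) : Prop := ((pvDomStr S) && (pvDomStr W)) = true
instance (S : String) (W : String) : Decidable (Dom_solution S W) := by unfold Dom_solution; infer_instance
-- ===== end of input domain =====

-- B replaces A's per-index slice-and-compare scan by repeated find-based substring
-- search for W and reversed W plus a sorted union-merge; measurably faster in practice.

-- ===== PORT A =====
-- literal port of A: for each i in enumerate(S), compare the slice S[i:i+len(W)] with W and with rw
def solution (S : String) (W : String) : List Int :=
  let lenW : Int := PySem.Str.len W
  let rw : String := String.ofList W.toList.reverse   -- ''.join(reversed(W))
  (PySem.List.enumerate S.toList).foldl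
    (fun indices p =>
      let j : Int := p.1 + lenW
      let pattern := PySem.Str.slice S (some p.1) (some j)
      if pattern = W then indices ++ [p.1]
      else if pattern = rw then indices ++ [p.1]
      else indices) []

-- ===== PORT B =====
-- the `while k != -1` loop of _occurrences; fuel = len(S)+1 is a totality guard only
def occGo (S p : String) : Nat → Int → List Int
  | 0, _ => []
  | fuel+1, k =>
      if k = -1 then []
      else k :: occGo S p fuel (PySem.Str.findFrom S p (k+1))

def occurrences (S p : String) : List Int :=
  occGo S p (S.toList.length + 1) (PySem.Str.find S p)

-- the two-pointer union-merge loop of _merge (pointer advances = consuming heads)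
def mergeU : List Int → List Int → List Int
  | [], ys => ys
  | x::xs, [] => x::xs
  | x::xs, y::ys =>
      if x < y then x :: mergeU xs (y::ys)
      else if y < x then y :: mergeU (x::xs) ys
      else x :: mergeU xs ys

def solution_alt (S : String) (W : String) : List Int :=
  if W = "" then PySem.List.pyRange 0 (PySem.Str.len S)   -- list(range(n))
  else
    mergeU (occurrences S W) (occurrences S (String.ofList W.toList.reverse))  -- rw = W[::-1]

-- ===== PRECONDITION & SPEC =====
def Spec_solution (S : String) (W : String) (out : List Int) : Prop := out = solution_alt S W
instance (S : String) (W : String) (out : List Int) : Decidable (Spec_solution S W out) := by unfold Spec_solution; infer_instance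

-- ===== CLAIM (what is proved, stated in full; the proofs are below) =====
def Claim_equal_solution : Prop := ∀ (S : String) (W : String), Dom_solution S W → Spec_solution S W (solution S W)

-- ===== LEMMAS AND PROOFS =====

-- common normal form: the indices k < len(S) at which W or reversed W is a prefix of S[k:]
def qpred (S W : String) (k : Nat) : Bool :=
  decide (W.toList <+: S.toList.drop k) || decide (W.toList.reverse <+: S.toList.drop k)

def NF (S W : String) : List Int :=
  ((List.range S.toList.length).filter (qpred S W)).map Int.ofNat

theorem take_eq_iff_prefix (l w : List Char) :
    (l.take w.length = w) ↔ w <+: l := by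
  constructor
  · intro h; exact h ▸ List.take_prefix _ _
  · rintro ⟨t, rfl⟩; simp

theorem str_eq_iff (s t : String) : s = t ↔ s.toList = t.toList :=
  ⟨fun h => by rw [h], fun h => String.ext h⟩

theorem cond_eq (S W : String) (k : Nat) :
    (decide (PySem.Str.slice S (some ((k:Int))) (some ((k:Int) + PySem.Str.len W)) = W)
     || decide (PySem.Str.slice S (some ((k:Int))) (some ((k:Int) + PySem.Str.len W)) = String.ofList W.toList.reverse))
    = qpred S W k := by
  have h1 : PySem.Str.slice S (some ((k:Int))) (some ((k:Int) + PySem.Str.len W)) = W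
      ↔ W.toList <+: S.toList.drop k := by
    rw [str_eq_iff, PySem.Str.toList_slice, PySem.Chars.slice_eq_listSlice,
        PySem.Str.len_eq, PySem.List.slice_natCast_add, take_eq_iff_prefix]
  have h2 : PySem.Str.slice S (some ((k:Int))) (some ((k:Int) + PySem.Str.len W)) = String.ofList W.toList.reverse
      ↔ W.toList.reverse <+: S.toList.drop k := by
    rw [str_eq_iff, PySem.Str.toList_slice, PySem.Chars.slice_eq_listSlice, PySem.Str.len_eq]
    have hl : (W.toList.length : Int) = ((W.toList.reverse.length : Nat) : Int) := by simp
    rw [hl, PySem.List.slice_natCast_add, String.toList_ofList]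
    exact take_eq_iff_prefix _ _
  unfold qpred
  rw [decide_eq_decide.mpr h1, decide_eq_decide.mpr h2]

theorem ite_ite_or {α : Type} (C1 C2 : Prop) [Decidable C1] [Decidable C2] (a1 a2 b : List α) (h : a1 = a2) :
    (if C1 then a1 else if C2 then a1 else b) = if (decide C1 || decide C2) = true then a2 else b := by
  subst h; by_cases h1 : C1 <;> by_cases h2 : C2 <;> simp [h1, h2]

theorem solution_eq_NF (S W : String) : solution S W = NF S W := by
  unfold solution
  have hfun : (fun (indices : List Int) (p : Int × Char) =>
      if PySem.Str.slice S (some p.1) (some (p.1 + PySem.Str.len W)) = W then indices ++ [p.1]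
      else if PySem.Str.slice S (some p.1) (some (p.1 + PySem.Str.len W)) = String.ofList W.toList.reverse then indices ++ [p.1]
      else indices)
      = fun indices p =>
        if (decide (PySem.Str.slice S (some p.1) (some (p.1 + PySem.Str.len W)) = W)
            || decide (PySem.Str.slice S (some p.1) (some (p.1 + PySem.Str.len W)) = String.ofList W.toList.reverse)) = true
        then indices ++ [p.1] else indices := by
    funext acc p
    exact ite_ite_or _ _ _ _ _ rfl
  show (PySem.List.enumerate S.toList).foldl _ [] = NF S W
  rw [hfun, PySem.List.foldl_append_if _ (fun p : Int × Char => p.1),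
      PySem.List.enumerate_eq_map_pyRange S.toList 'a', List.filter_map, List.map_map,
      PySem.List.pyRange_one, List.filter_map, List.map_map]
  simp only [List.nil_append, PySem.List.len_eq, Int.sub_zero, Int.toNat_natCast]
  rw [List.filter_congr (fun k _ => by
        show _ = qpred S W k
        simp only [Function.comp_apply, Int.zero_add]
        exact cond_eq S W k)]
  unfold NF
  exact List.map_congr_left (fun k _ => by simp [Function.comp])

theorem prefix_drop_infix {p l : List Char} {k i : Nat} (hk : k ≤ i) (h : p <+: l.drop i) :
    p <:+: l.drop k := by
  have hsuf : l.drop i <:+ l.drop k := by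
    have h2 := List.drop_suffix (i - k) (l.drop k)
    rwa [List.drop_drop, Nat.add_sub_cancel' hk] at h2
  exact h.isInfix.trans hsuf.isInfix

theorem occGo_spec (S p : String) (hp : p.toList ≠ []) :
    ∀ (fuel k : Nat), k ≤ S.toList.length → S.toList.length + 1 ≤ fuel + k →
    occGo S p fuel (PySem.Chars.findFrom S.toList p.toList (k : Int)) =
      ((List.range' k (S.toList.length - k)).filter
        (fun i => decide (p.toList <+: S.toList.drop i))).map Int.ofNat := by
  intro fuel
  induction fuel with
  | zero => intro k hk hf; omega
  | succ fuel ih =>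
    intro k hk hf
    by_cases hr : PySem.Chars.findFrom S.toList p.toList (k : Int) = -1
    · rw [occGo, if_pos hr]
      have hni : ¬ p.toList <:+: S.toList.drop k :=
        (PySem.Chars.findFrom_natCast_eq_neg_one_iff S.toList p.toList k hk).mp hr
      have : ((List.range' k (S.toList.length - k)).filter
          (fun i => decide (p.toList <+: S.toList.drop i))) = [] := by
        rw [List.filter_eq_nil_iff]
        intro i hi
        simp only [List.mem_range'_1] at hi
        simp only [decide_eq_true_eq]
        intro hpre
        exact hni (prefix_drop_infix hi.1 hpre)
      rw [this]; rfl
    · obtain ⟨hkr, hpref, hmin⟩ :=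
        PySem.Chars.findFrom_natCast_spec S.toList p.toList k hk hr
      set r := PySem.Chars.findFrom S.toList p.toList (k : Int) with hrdef
      have hr0 : 0 ≤ r := le_trans (Int.natCast_nonneg k) hkr
      have hrn : r = ((r.toNat : Nat) : Int) := (Int.toNat_of_nonneg hr0).symm
      have hkrn : k ≤ r.toNat := by omega
      have hrlt : r.toNat < S.toList.length := by
        by_contra hge
        have : S.toList.drop r.toNat = [] := List.drop_eq_nil_of_le (by omega)
        rw [this] at hpref
        exact hp (List.prefix_nil.mp hpref)
      rw [occGo, if_neg hr]
      have hsplit : List.range' k (S.toList.length - k) =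
          List.range' k (r.toNat - k) ++ List.range' r.toNat (S.toList.length - r.toNat) := by
        have := List.range'_append (s := k) (m := r.toNat - k)
            (n := S.toList.length - r.toNat) (step := 1)
        rw [show k + 1 * (r.toNat - k) = r.toNat by omega] at this
        rw [show S.toList.length - k = (r.toNat - k) + (S.toList.length - r.toNat) by omega]
        exact this.symm
      rw [hsplit, List.filter_append]
      have h1 : (List.range' k (r.toNat - k)).filter
          (fun i => decide (p.toList <+: S.toList.drop i)) = [] := by
        rw [List.filter_eq_nil_iff]
        intro i hi
        simp only [List.mem_range'_1] at hi
        simp only [decide_eq_true_eq]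
        exact hmin i hi.1 (by omega)
      have h2 : List.range' r.toNat (S.toList.length - r.toNat) =
          r.toNat :: List.range' (r.toNat + 1) (S.toList.length - (r.toNat + 1)) := by
        rw [show S.toList.length - r.toNat = (S.toList.length - (r.toNat + 1)) + 1 by omega,
            List.range'_succ]
      rw [h1, h2, List.nil_append, List.filter_cons, if_pos (by simpa using hpref)]
      simp only [List.map_cons]
      refine List.cons_eq_cons.mpr ⟨by omega, ?_⟩
      simp only [PySem.Str.findFrom_eq]
      rw [show r + 1 = (((r.toNat + 1 : Nat)) : Int) by omega]
      exact ih (r.toNat + 1) (by omega) (by omega)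

theorem occurrences_spec (S p : String) (hp : p.toList ≠ []) :
    occurrences S p = ((List.range S.toList.length).filter
      (fun i => decide (p.toList <+: S.toList.drop i))).map Int.ofNat := by
  unfold occurrences
  have h0 : PySem.Str.find S p = PySem.Chars.findFrom S.toList p.toList ((0 : Nat) : Int) := by
    rw [PySem.Str.find_eq, ← PySem.Chars.findFrom_zero]
    norm_num
  rw [h0, occGo_spec S p hp (S.toList.length + 1) 0 (by omega) (by omega)]
  rw [List.range_eq_range']
  simp

theorem mergeU_nil_right (A : List Int) : mergeU A [] = A := by
  cases A <;> simp [mergeU]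

theorem mergeU_cons_left {a : Int} {A B : List Int} (h : ∀ b ∈ B, a < b) :
    mergeU (a::A) B = a :: mergeU A B := by
  cases B with
  | nil => rw [mergeU_nil_right, mergeU_nil_right]
  | cons b bs =>
    have hab : a < b := h b (List.mem_cons_self)
    simp [mergeU, hab]

theorem mergeU_cons_right {b : Int} {A B : List Int} (h : ∀ a ∈ A, b < a) :
    mergeU A (b::B) = b :: mergeU A B := by
  cases A with
  | nil => simp [mergeU]
  | cons a as =>
    have hba : b < a := h a (List.mem_cons_self)
    rw [mergeU, if_neg (by omega), if_pos hba]

theorem mergeU_cons_eq (a : Int) (A B : List Int) : mergeU (a::A) (a::B) = a :: mergeU A B := by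
  simp [mergeU]

theorem mergeU_filter (p q : Nat → Bool) :
    ∀ (m k : Nat),
    mergeU (((List.range' k m).filter p).map Int.ofNat)
           (((List.range' k m).filter q).map Int.ofNat)
    = ((List.range' k m).filter (fun i => p i || q i)).map Int.ofNat := by
  intro m
  induction m with
  | zero => intro k; simp [mergeU]
  | succ m ih =>
    intro k
    have hgt : ∀ (f : Nat → Bool) (b : Int),
        b ∈ ((List.range' (k+1) m).filter f).map Int.ofNat → (Int.ofNat k) < b := by
      intro f b hb
      simp only [List.mem_map, List.mem_filter, List.mem_range'_1] at hb
      obtain ⟨i, ⟨⟨hi1, _⟩, _⟩, rfl⟩ := hb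
      exact Int.ofNat_lt.mpr (by omega)
    rw [List.range'_succ]
    rcases Bool.eq_false_or_eq_true (p k) with hp | hp <;>
      rcases Bool.eq_false_or_eq_true (q k) with hq | hq <;>
      simp only [List.filter_cons, hp, hq, Bool.true_or, Bool.false_or, Bool.or_self,
        if_true, Bool.false_eq_true, if_false, List.map_cons]
    all_goals first
      | exact ih (k+1)
      | rw [mergeU_cons_left (hgt q), ih]
      | rw [mergeU_cons_right (hgt p), ih]
      | rw [mergeU_cons_eq, ih]

theorem toList_ne_nil (W : String) (h : W ≠ "") : W.toList ≠ [] := by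
  intro hnil
  exact h (String.ext (by simpa using hnil))

theorem solution_alt_eq_NF (S W : String) : solution_alt S W = NF S W := by
  by_cases hW : W = ""
  · subst hW
    unfold solution_alt NF qpred
    rw [if_pos rfl, PySem.Str.len_eq, PySem.List.pyRange_one]
    simp
  · unfold solution_alt
    rw [if_neg hW,
        occurrences_spec S W (toList_ne_nil W hW),
        occurrences_spec S (String.ofList W.toList.reverse)
          (by simp only [String.toList_ofList, ne_eq, List.reverse_eq_nil_iff]
              exact toList_ne_nil W hW),
        List.range_eq_range', mergeU_filter]
    unfold NF qpred
    rw [List.range_eq_range']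
    simp [String.toList_ofList]

-- ===== VERDICT (by name: the statement is the Claim_ definition above) =====
theorem solution_spec : Claim_equal_solution := by
  intro S W _
  unfold Spec_solution
  rw [solution_eq_NF, solution_alt_eq_NF]
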